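-- pv_equiv track=rewrite | github.com/breivens/scriptingtalen | exercise series (2019–2020)/week_03 [Python]/Bitcoins.py | is_valid_plan
-- ===== SOURCE A (Python) =====
-- def is_valid_plan(plan):
--     bitcoin = 0
--     for action in plan:
--         bitcoin += {"S": -1, "B": 1}.get(action, 0)
--         if bitcoin not in (0, 1):  # can only be 0 or 1
--             return False
--     if bitcoin != 0:  # no leftovers allowed
--         return False
--     return True
-- ===== SOURCE B (Python) =====
-- def is_valid_plan(plan):
--     moves = [a for a in plan if a in ("B", "S")]
--     if len(moves) % 2 == 1:
--         return False
--     return all(moves[i] == ("B" if i % 2 == 0 else "S") for i in range(len(moves)))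
-- ===== Notes on version B (the rewrite author's own statement) =====
-- stated objective: alternative
-- what changed: B replaces A's running balance counter with early exit by a positional characterization: filter out the B/S moves, then require even length and the exact alternating pattern B,S,B,S,... by index parity.
import Mathlib
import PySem

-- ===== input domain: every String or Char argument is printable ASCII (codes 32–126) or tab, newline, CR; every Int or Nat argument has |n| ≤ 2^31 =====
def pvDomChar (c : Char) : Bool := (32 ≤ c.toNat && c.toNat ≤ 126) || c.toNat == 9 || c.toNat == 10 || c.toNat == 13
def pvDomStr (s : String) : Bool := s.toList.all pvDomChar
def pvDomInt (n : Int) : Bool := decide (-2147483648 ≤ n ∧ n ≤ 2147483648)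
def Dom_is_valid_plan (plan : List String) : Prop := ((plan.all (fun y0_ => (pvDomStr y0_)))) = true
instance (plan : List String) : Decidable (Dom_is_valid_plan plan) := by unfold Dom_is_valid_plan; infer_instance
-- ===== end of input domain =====

-- B validates by pattern (filter the B/S moves, require even length and B at even,
-- S at odd indices) instead of A's running balance counter; objective: alternative.

-- ===== PORT A =====
-- A's loop with early return, as structural recursion carrying the running balance.
def is_valid_plan_go (bitcoin : Int) (rest : List String) : Bool :=
  match rest with
  | [] => bitcoin == 0                -- 'if bitcoin != 0: return False; return True'
  | action :: rest =>
    let bitcoin := bitcoin + ((PySem.Dict.empty.insert "S" (-1 : Int)).insert "B" 1).getD action 0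
    if !(bitcoin == 0 || bitcoin == 1) then false
    else is_valid_plan_go bitcoin rest

def is_valid_plan (plan : List String) : Bool := is_valid_plan_go 0 plan

-- ===== PORT B =====
def is_valid_plan_alt (plan : List String) : Bool :=
  let moves := plan.filter (fun a => a == "B" || a == "S")
  if moves.length % 2 == 1 then false
  else (List.range moves.length).all
    (fun i => moves.getD i "" == (if i % 2 == 0 then "B" else "S"))

-- ===== PRECONDITION & SPEC =====
def Spec_is_valid_plan (plan : List String) (out : Bool) : Prop := out = is_valid_plan_alt plan
instance (plan : List String) (out : Bool) : Decidable (Spec_is_valid_plan plan out) := by unfold Spec_is_valid_plan; infer_instance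

-- ===== CLAIM (what is proved, stated in full; the proofs are below) =====
def Claim_equal_is_valid_plan : Prop := ∀ (plan : List String), Dom_is_valid_plan plan → Spec_is_valid_plan plan (is_valid_plan plan)

-- ===== LEMMAS AND PROOFS =====

-- "expectation automaton": e = true means the next move must be "B" (balance 0),
-- e = false means it must be "S" (balance 1); non-moves are skipped.
def pvAlt (e : Bool) : List String → Bool
  | [] => e
  | a :: l =>
    if a == "B" then (if e then pvAlt false l else false)
    else if a == "S" then (if e then false else pvAlt true l)
    else pvAlt e l

-- the alternating-pattern check, recursively
def pvCheck (e : Bool) : List String → Bool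
  | [] => true
  | a :: l => (a == (if e then "B" else "S")) && pvCheck (!e) l

theorem pvAlt_eq_go : ∀ (l : List String),
    is_valid_plan_go 0 l = pvAlt true l ∧ is_valid_plan_go 1 l = pvAlt false l := by
  intro l
  induction l with
  | nil => constructor <;> rfl
  | cons a l ih =>
    by_cases hB : a = "B" <;> by_cases hS : a = "S" <;>
      simp_all [is_valid_plan_go, pvAlt, PySem.Dict.getD_insert, PySem.Dict.getD_empty]

theorem pvAlt_filter (l : List String) (e : Bool) :
    pvAlt e l = pvAlt e (l.filter (fun a => a == "B" || a == "S")) := by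
  induction l generalizing e with
  | nil => rfl
  | cons a l ih =>
    by_cases hB : a = "B" <;> by_cases hS : a = "S" <;>
      simp_all [pvAlt]
    cases e <;> simp_all

theorem pvAlt_moves (ms : List String)
    (h : ∀ x ∈ ms, x = "B" ∨ x = "S") (e : Bool) :
    pvAlt e ms = (pvCheck e ms && (e == decide (ms.length % 2 == 0))) := by
  induction ms generalizing e with
  | nil => cases e <;> rfl
  | cons a l ih =>
    have ha := h a (List.mem_cons_self ..)
    have hl : ∀ x ∈ l, x = "B" ∨ x = "S" := fun x hx => h x (List.mem_cons_of_mem _ hx)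
    have hpar : ((!e) == decide (l.length % 2 == 0))
        = (e == decide ((a :: l).length % 2 == 0)) := by
      rcases Nat.mod_two_eq_zero_or_one l.length with hk | hk <;>
        cases e <;> simp [List.length_cons, Nat.add_mod, hk]
    rcases ha with rfl | rfl <;> cases e <;>
      simp_all [pvAlt, pvCheck]

theorem pvCheck_range (ms : List String) (e : Bool) :
    pvCheck e ms = (List.range ms.length).all
      (fun i => ms.getD i "" == (if i % 2 == 0 then (if e then "B" else "S")
                                 else (if e then "S" else "B"))) := by
  induction ms generalizing e with
  | nil => rfl
  | cons a l ih =>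
    have h1 : ∀ (x : Nat) (s t : String),
        (if (x + 1) % 2 = 0 then s else t) = (if x % 2 = 0 then t else s) := by
      intro x s t
      rcases Nat.mod_two_eq_zero_or_one x with hk | hk <;> simp [Nat.add_mod, hk]
    simp only [List.length_cons, List.range_succ_eq_map, List.all_cons, List.all_map,
      List.getD_cons_zero]
    rw [pvCheck, ih (!e)]
    cases e <;> simp [List.all_eq, h1]

-- ===== VERDICT =====
theorem is_valid_plan_spec : Claim_equal_is_valid_plan := by
  intro plan _
  unfold Spec_is_valid_plan is_valid_plan is_valid_plan_alt
  set ms := plan.filter (fun a => a == "B" || a == "S") with hms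
  have hmem : ∀ x ∈ ms, x = "B" ∨ x = "S" := by
    intro x hx
    have := List.of_mem_filter hx
    simpa using this
  have h1 : is_valid_plan_go 0 plan = (pvCheck true ms && decide (ms.length % 2 == 0)) := by
    rw [(pvAlt_eq_go plan).1, pvAlt_filter plan true, ← hms, pvAlt_moves ms hmem true]
    simp
  rw [h1]
  have h2 : pvCheck true ms
      = (List.range ms.length).all (fun i => ms.getD i "" == (if i % 2 == 0 then "B" else "S")) := by
    rw [pvCheck_range ms true]; simp
  rw [h2]
  rcases Nat.mod_two_eq_zero_or_one ms.length with hk | hk <;> simp [hk]
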